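-- pv_equiv track=rewrite | github.com/ssyy5460/Algorithm | 프로그래머스/1/12930. 이상한 문자 만들기/이상한 문자 만들기.py | solution
-- ===== SOURCE A (Python) =====
-- def solution(s):
--     words = s.split(' ')  # 공백을 기준으로 단어를 나눕니다.
--     result = []
--
--     for word in words:
--         new_word = ''
--         for i, char in enumerate(word):
--             if i % 2 == 0:  # 짝수 인덱스
--                 new_word += char.upper()
--             else:  # 홀수 인덱스
--                 new_word += char.lower()
--         result.append(new_word)
--
--     return ' '.join(result)  # 변환된 단어들을 공백으로 연결하여 반환합니다.
-- ===== SOURCE B (Python) =====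
-- def solution(s):
--     out = []
--     k = 0
--     for ch in s:
--         if ch == ' ':
--             out.append(ch)
--             k = 0
--         else:
--             out.append(ch.upper() if k % 2 == 0 else ch.lower())
--             k += 1
--     return ''.join(out)
-- ===== Notes on version B (the rewrite author's own statement) =====
-- stated objective: simpler
-- what changed: Replaced split-on-space plus a nested per-word enumerate loop plus join with a single pass over the string keeping a position counter that resets to 0 at each space.
import Mathlib
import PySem

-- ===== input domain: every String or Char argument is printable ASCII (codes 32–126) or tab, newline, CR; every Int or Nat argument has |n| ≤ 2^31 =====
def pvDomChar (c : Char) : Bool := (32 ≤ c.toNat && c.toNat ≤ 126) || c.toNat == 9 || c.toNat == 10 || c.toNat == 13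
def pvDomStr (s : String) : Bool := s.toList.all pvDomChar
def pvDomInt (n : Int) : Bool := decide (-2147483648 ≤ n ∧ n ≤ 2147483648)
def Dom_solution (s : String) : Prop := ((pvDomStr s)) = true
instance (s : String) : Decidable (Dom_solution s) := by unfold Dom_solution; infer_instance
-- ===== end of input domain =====

-- B replaces A's split-into-words + nested enumerate loop by a single pass with a
-- position counter that resets on every space (objective: simpler, one traversal).

-- ===== PORT A =====
-- A's inner loop: new_word built by folding over enumerate(word)
def awordA (w : List Char) : List Char :=
  (PySem.List.enumerate w 0).foldl
    (fun nw ic =>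
      if ic.1 % 2 == 0 then nw ++ [PySem.Chars.upperChar ic.2]
      else nw ++ [PySem.Chars.lowerChar ic.2]) []

def solution (s : String) : String :=
  let words := PySem.Chars.splitOn s.toList [' ']
  let result := words.foldl (fun res w => res ++ [awordA w]) []
  String.ofList (PySem.Chars.join [' '] result)

-- ===== PORT B =====
-- B's single loop: counter k, reset to 0 on a space
def bgo (k : Int) : List Char → List Char
  | [] => []
  | c :: rest =>
    if c = ' ' then c :: bgo 0 rest
    else (if k % 2 == 0 then PySem.Chars.upperChar c else PySem.Chars.lowerChar c)
           :: bgo (k + 1) rest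

def solution_alt (s : String) : String := String.ofList (bgo 0 s.toList)

-- ===== PRECONDITION & SPEC =====
def Spec_solution (s : String) (out : String) : Prop := out = solution_alt s
instance (s : String) (out : String) : Decidable (Spec_solution s out) := by unfold Spec_solution; infer_instance

-- ===== CLAIM (what is proved, stated in full; the proofs are below) =====
def Claim_equal_solution : Prop := ∀ (s : String), Dom_solution s → Spec_solution s (solution s)

-- ===== LEMMAS AND PROOFS =====

-- structural splitter on ' ' (proof-side characterisation of PySem.Chars.splitOn)
def splitSp : List Char → List (List Char)
  | [] => [[]]
  | c :: rest =>
    if c = ' ' then [] :: splitSp rest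
    else
      match splitSp rest with
      | [] => [[c]]
      | w :: ws => (c :: w) :: ws

lemma splitSp_ne_nil (l : List Char) : splitSp l ≠ [] := by
  cases l with
  | nil => simp [splitSp]
  | cons c rest =>
    simp only [splitSp]
    split_ifs
    · simp
    · cases h : splitSp rest <;> simp

lemma go_spec (l : List Char) : ∀ (fuel : Nat) (cur : List Char) (acc : List (List Char)),
    l.length < fuel →
    PySem.Chars.splitOn.go [' '] fuel l cur acc =
      acc.reverse ++ (cur.reverse ++ (splitSp l).headI) :: (splitSp l).tail := by
  induction l with
  | nil =>
    intro fuel cur acc h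
    cases fuel with
    | zero => omega
    | succ n => simp [PySem.Chars.splitOn.go, splitSp]
  | cons c rest ih =>
    intro fuel cur acc h
    cases fuel with
    | zero => simp at h
    | succ n =>
      by_cases hc : c = ' '
      · subst hc
        have : PySem.Chars.splitOn.go [' '] (n+1) (' ' :: rest) cur acc =
            PySem.Chars.splitOn.go [' '] n rest [] (cur.reverse :: acc) := by
          simp [PySem.Chars.splitOn.go, List.isPrefixOf]
        rw [this, ih n [] (cur.reverse :: acc) (by simp at h; omega)]
        obtain ⟨w, ws, hw⟩ : ∃ w ws, splitSp rest = w :: ws := by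
          cases hr : splitSp rest with
          | nil => exact absurd hr (splitSp_ne_nil rest)
          | cons w ws => exact ⟨w, ws, rfl⟩
        simp [splitSp, hw]
      · have : PySem.Chars.splitOn.go [' '] (n+1) (c :: rest) cur acc =
            PySem.Chars.splitOn.go [' '] n rest (c :: cur) acc := by
          simp [PySem.Chars.splitOn.go, List.isPrefixOf, (by simpa using Ne.symm hc : (' ' == c) = false)]
        rw [this, ih n (c :: cur) acc (by simp at h; omega)]
        obtain ⟨w, ws, hw⟩ : ∃ w ws, splitSp rest = w :: ws := by
          cases hr : splitSp rest with
          | nil => exact absurd hr (splitSp_ne_nil rest)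
          | cons w ws => exact ⟨w, ws, rfl⟩
        simp [splitSp, hc, hw]

lemma splitOn_eq_splitSp (cs : List Char) :
    PySem.Chars.splitOn cs [' '] = splitSp cs := by
  have h := go_spec cs (cs.length + 1) [] [] (by omega)
  have hne := splitSp_ne_nil cs
  rw [PySem.Chars.splitOn, h]
  cases hs : splitSp cs with
  | nil => exact absurd hs hne
  | cons w ws => simp

-- conversion of one word with the counter starting at k
def convFrom (k : Int) : List Char → List Char
  | [] => []
  | c :: w =>
    (if k % 2 == 0 then PySem.Chars.upperChar c else PySem.Chars.lowerChar c)
      :: convFrom (k + 1) w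

lemma awordA_foldl (w : List Char) : ∀ (k : Int) (a : List Char),
    (PySem.List.enumerate w k).foldl
      (fun nw ic =>
        if ic.1 % 2 == 0 then nw ++ [PySem.Chars.upperChar ic.2]
        else nw ++ [PySem.Chars.lowerChar ic.2]) a = a ++ convFrom k w := by
  induction w with
  | nil => intro k a; simp [PySem.List.enumerate_nil, convFrom]
  | cons c w ih =>
    intro k a
    rw [PySem.List.enumerate_cons]
    simp only [List.foldl_cons, ih, convFrom]
    split_ifs <;> simp_all

lemma awordA_eq (w : List Char) : awordA w = convFrom 0 w := by
  simpa [awordA] using awordA_foldl w 0 []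

-- what B computes on the split decomposition
def conv2 (k : Int) : List (List Char) → List Char
  | [] => []
  | w :: ws => convFrom k w ++ (ws.map (fun v => ' ' :: convFrom 0 v)).flatten

lemma bgo_eq_conv2 (cs : List Char) : ∀ (k : Int), bgo k cs = conv2 k (splitSp cs) := by
  induction cs with
  | nil => intro k; simp [bgo, splitSp, conv2, convFrom]
  | cons c rest ih =>
    intro k
    by_cases hc : c = ' '
    · subst hc
      obtain ⟨w, ws, hw⟩ : ∃ w ws, splitSp rest = w :: ws := by
        cases hr : splitSp rest with
        | nil => exact absurd hr (splitSp_ne_nil rest)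
        | cons w ws => exact ⟨w, ws, rfl⟩
      simp [bgo, splitSp, conv2, convFrom, ih, hw]
    · obtain ⟨w, ws, hw⟩ : ∃ w ws, splitSp rest = w :: ws := by
        cases hr : splitSp rest with
        | nil => exact absurd hr (splitSp_ne_nil rest)
        | cons w ws => exact ⟨w, ws, rfl⟩
      simp [bgo, splitSp, conv2, convFrom, ih, hw, hc]

lemma foldl_push_map {α β : Type} (l : List α) (f : α → β) :
    ∀ (a : List β), l.foldl (fun res w => res ++ [f w]) a = a ++ l.map f := by
  induction l with
  | nil => intro a; simp
  | cons x xs ih => intro a; simp [ih]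

lemma join_map_convFrom (ws : List (List Char)) : ∀ (w : List Char),
    PySem.Chars.join [' '] ((w :: ws).map (convFrom 0)) = conv2 0 (w :: ws) := by
  induction ws with
  | nil => intro w; simp [PySem.Chars.join, List.intercalate, conv2]
  | cons v vs ih =>
    intro w
    have step : List.intercalate [' '] (convFrom 0 w :: convFrom 0 v :: vs.map (convFrom 0)) =
        convFrom 0 w ++ [' '] ++ List.intercalate [' '] (convFrom 0 v :: vs.map (convFrom 0)) := by
      simp [List.intercalate, List.intersperse]
    have ihv := ih v
    simp only [PySem.Chars.join, List.map_cons] at ihv ⊢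
    rw [step, ihv]
    simp [conv2]

-- ===== VERDICT (by name: the statement is the Claim_ definition above) =====
theorem solution_spec : Claim_equal_solution := by
  intro s _
  unfold Spec_solution solution solution_alt
  simp only [splitOn_eq_splitSp, foldl_push_map, List.nil_append, bgo_eq_conv2]
  congr 1
  have := splitSp_ne_nil s.toList
  cases hs : splitSp s.toList with
  | nil => exact absurd hs this
  | cons w ws =>
    rw [List.map_congr_left (fun w _ => awordA_eq w), join_map_convFrom]
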